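-- pv_equiv track=rewrite | github.com/willdurant/AoC-2025 | Day4/d4.py | identify_rolls
-- ===== SOURCE A (Python) =====
-- def identify_rolls(
--     previous_row: list[str], current_row: list[str], next_row: list[str]
-- ) -> tuple[int, str]:
--     rolls_found = 0
--     converted_row = []
--     for i, option in enumerate(current_row):
--         start = 0 if i == 0 else i - 1
--         end = i + 2
--         if option == "@":
--             adjacency_area = (
--                 previous_row[start:end] + current_row[start:end] + next_row[start:end]
--             )
--             adjacency_area = [
--                 1 if selection == "@" else 0 for selection in adjacency_area
--             ]
--             total_adjacent = sum(adjacency_area) - 1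
--             if total_adjacent < 4:
--                 rolls_found += 1
--                 converted_row.append("x")
--                 continue
--
--         converted_row.append(option)
--
--     return rolls_found, "".join(converted_row)
-- ===== SOURCE B (Python) =====
-- def identify_rolls(previous_row, current_row, next_row):
--     rows = (previous_row, current_row, next_row)
--     m = max(len(previous_row), len(current_row), len(next_row))
--     # prefix sums of per-column '@' counts over the three rows
--     pre = [0]
--     s = 0
--     for j in range(m):
--         for row in rows:
--             if j < len(row) and row[j] == "@":
--                 s += 1
--         pre.append(s)
--     rolls_found = 0
--     converted = []
--     for i, option in enumerate(current_row):
--         if option == "@":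
--             lo = 0 if i == 0 else i - 1
--             hi = min(i + 2, m)
--             if pre[hi] - pre[lo] - 1 < 4:
--                 rolls_found += 1
--                 converted.append("x")
--                 continue
--         converted.append(option)
--     return rolls_found, "".join(converted)
-- ===== Notes on version B (the rewrite author's own statement) =====
-- stated objective: alternative
-- what changed: B precomputes a single prefix-sum table of per-column '@' counts across the three rows (guarding unequal row lengths) and answers each '@' cell with one subtraction, instead of A's slicing and re-scanning a 3x3 neighborhood of all three rows per cell.
import Mathlib
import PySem

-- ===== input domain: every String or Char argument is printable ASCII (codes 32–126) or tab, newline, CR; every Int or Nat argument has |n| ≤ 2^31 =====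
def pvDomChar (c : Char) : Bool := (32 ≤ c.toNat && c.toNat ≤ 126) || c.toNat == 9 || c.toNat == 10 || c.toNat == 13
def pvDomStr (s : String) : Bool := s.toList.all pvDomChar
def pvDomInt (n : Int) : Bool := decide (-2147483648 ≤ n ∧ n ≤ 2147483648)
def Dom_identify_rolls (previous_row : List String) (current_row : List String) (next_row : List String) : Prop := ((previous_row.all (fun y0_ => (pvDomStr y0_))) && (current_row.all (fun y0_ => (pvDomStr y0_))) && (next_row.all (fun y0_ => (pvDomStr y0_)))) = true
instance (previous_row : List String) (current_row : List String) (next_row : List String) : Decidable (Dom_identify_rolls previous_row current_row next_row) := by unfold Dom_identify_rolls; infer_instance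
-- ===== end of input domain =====

-- B replaces A's per-cell three-row neighborhood slicing by a prefix-sum table of per-column
-- '@' counts built once, answering each '@' cell by one subtraction (objective: alternative).

-- ===== PORT A =====
def identify_rolls (previous_row : List String) (current_row : List String) (next_row : List String) : Int × String :=
  let res := (PySem.List.enumerate current_row).foldl
    (fun (st : Int × List String) (io : Int × String) =>
      let i := io.1
      let opt := io.2
      let start : Int := if i = 0 then 0 else i - 1
      let stop : Int := i + 2
      if opt = "@" then
        let adjacency_area :=
          PySem.List.slice previous_row (some start) (some stop) ++
          PySem.List.slice current_row (some start) (some stop) ++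
          PySem.List.slice next_row (some start) (some stop)
        let adjacency_area2 := adjacency_area.map (fun selection => if selection = "@" then (1 : Int) else 0)
        let total_adjacent := adjacency_area2.sum - 1
        if total_adjacent < 4 then (st.1 + 1, st.2 ++ ["x"])
        else (st.1, st.2 ++ [opt])
      else (st.1, st.2 ++ [opt]))
    ((0 : Int), ([] : List String))
  (res.1, PySem.Str.join "" res.2)

-- ===== PORT B =====
def identify_rolls_alt (previous_row : List String) (current_row : List String) (next_row : List String) : Int × String :=
  let m := max (max previous_row.length current_row.length) next_row.length
  -- pre[k] = number of '@' cells in columns 0..k-1 over the three rows (prefix sums)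
  let pre := ((List.range m).foldl
    (fun (st : Int × List Int) (j : Nat) =>
      let s := [previous_row, current_row, next_row].foldl
        (fun (s : Int) (row : List String) =>
          if j < row.length ∧ row.getD j "" = "@" then s + 1 else s) st.1
      (s, st.2 ++ [s]))
    ((0 : Int), ([0] : List Int))).2
  let res := (PySem.List.enumerate current_row).foldl
    (fun (st : Int × List String) (io : Int × String) =>
      let i := io.1
      let opt := io.2
      if opt = "@" then
        -- i comes from enumerate, so 0 ≤ i; lo/hi are in range of pre by construction
        let lo : Nat := if i = 0 then 0 else (i - 1).toNat
        let hi : Nat := min (i + 2).toNat m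
        if pre.getD hi 0 - pre.getD lo 0 - 1 < 4 then (st.1 + 1, st.2 ++ ["x"])
        else (st.1, st.2 ++ [opt])
      else (st.1, st.2 ++ [opt]))
    ((0 : Int), ([] : List String))
  (res.1, PySem.Str.join "" res.2)

-- ===== PRECONDITION & SPEC =====
def Spec_identify_rolls (previous_row : List String) (current_row : List String) (next_row : List String) (out : Int × String) : Prop := out = identify_rolls_alt previous_row current_row next_row
instance (previous_row : List String) (current_row : List String) (next_row : List String) (out : Int × String) : Decidable (Spec_identify_rolls previous_row current_row next_row out) := by unfold Spec_identify_rolls; infer_instance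

-- ===== CLAIM (what is proved, stated in full; the proofs are below) =====
def Claim_equal_identify_rolls : Prop := ∀ (previous_row : List String) (current_row : List String) (next_row : List String), Dom_identify_rolls previous_row current_row next_row → Spec_identify_rolls previous_row current_row next_row (identify_rolls previous_row current_row next_row)

-- ===== LEMMAS AND PROOFS =====

/-- indicator used on both sides -/
def pvInd (row : List String) (j : Nat) : Int :=
  if j < row.length ∧ row.getD j "" = "@" then 1 else 0

/-- prefix count of '@' in the first k cells of a row -/
def pvP (row : List String) (k : Nat) : Int :=
  ((row.take k).map (fun s => if s = "@" then (1 : Int) else 0)).sum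

lemma pvP_eq_range (row : List String) (k : Nat) :
    pvP row k = ((List.range k).map (pvInd row)).sum := by
  induction k with
  | zero => simp [pvP]
  | succ t ih =>
    rw [pvP, List.take_add_one, List.map_append, List.sum_append, List.range_succ,
      List.map_append, List.sum_append, ← pvP, ih]
    congr 1
    by_cases h : t < row.length
    · simp [pvInd, h]
    · simp [pvInd, h]

lemma pvP_stable (row : List String) {a b : Nat} (ha : row.length ≤ a) (hb : row.length ≤ b) :
    pvP row a = pvP row b := by
  simp [pvP, List.take_of_length_le ha, List.take_of_length_le hb]

/-- the drop/take slice count is a difference of prefix counts -/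
lemma pvSliceCount (row : List String) (s t : Nat) :
    (((row.drop s).take t).map (fun x => if x = "@" then (1 : Int) else 0)).sum
      = pvP row (s + t) - pvP row s := by
  have h : row.take (s + t) = row.take s ++ (row.drop s).take t := by
    rw [← List.take_append_drop s (row.take (s+t))]
    congr 1
    · rw [List.take_take]; congr 1; omega
    · rw [List.drop_take]; congr 1; omega
  have h2 : pvP row (s + t) = pvP row s + (((row.drop s).take t).map (fun x => if x = "@" then (1 : Int) else 0)).sum := by
    rw [pvP, h, List.map_append, List.sum_append]; rfl
  omega

/-- the prefix-sum fold produces the list of running sums -/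
lemma pvFoldPre (f : Nat → Int) (m : Nat) : ∀ (s0 : Int) (acc : List Int),
    (List.range m).foldl (fun (st : Int × List Int) j => (st.1 + f j, st.2 ++ [st.1 + f j])) (s0, acc)
      = (s0 + ((List.range m).map f).sum,
         acc ++ (List.range m).map (fun k => s0 + ((List.range (k+1)).map f).sum)) := by
  induction m with
  | zero => simp
  | succ t ih =>
    intro s0 acc
    rw [List.range_succ, List.foldl_append, ih]
    simp [List.range_succ, List.foldl]
    ring

/-- the inner 3-row fold is addition of the three indicators -/
lemma pvInner (p c n : List String) (j : Nat) (s : Int) :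
    [p, c, n].foldl (fun (s : Int) (row : List String) =>
        if j < row.length ∧ row.getD j "" = "@" then s + 1 else s) s
      = s + (pvInd p j + pvInd c j + pvInd n j) := by
  simp only [List.foldl, pvInd]
  split_ifs <;> ring

/-- the column prefix table B builds, in closed form -/
lemma pvPreSpec (p c n : List String) (m : Nat) :
    ((List.range m).foldl (fun (st : Int × List Int) (j : Nat) =>
        ([p, c, n].foldl (fun (s : Int) (row : List String) =>
            if j < row.length ∧ row.getD j "" = "@" then s + 1 else s) st.1,
         st.2 ++ [[p, c, n].foldl (fun (s : Int) (row : List String) =>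
            if j < row.length ∧ row.getD j "" = "@" then s + 1 else s) st.1]))
      ((0 : Int), ([0] : List Int))).2
    = [0] ++ (List.range m).map
        (fun k => ((List.range (k+1)).map (fun j => pvInd p j + pvInd c j + pvInd n j)).sum) := by
  have hstep : (fun (st : Int × List Int) (j : Nat) =>
        (([p, c, n].foldl (fun (s : Int) (row : List String) =>
            if j < row.length ∧ row.getD j "" = "@" then s + 1 else s) st.1 : Int),
         st.2 ++ [[p, c, n].foldl (fun (s : Int) (row : List String) =>
            if j < row.length ∧ row.getD j "" = "@" then s + 1 else s) st.1]))
      = (fun (st : Int × List Int) (j : Nat) =>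
          (st.1 + (pvInd p j + pvInd c j + pvInd n j),
           st.2 ++ [st.1 + (pvInd p j + pvInd c j + pvInd n j)])) := by
    funext st j
    simp only [pvInner]
  rw [hstep, pvFoldPre]
  simp

lemma pvPre_getD (p c n : List String) (m k : Nat) (hk : k ≤ m) :
    (([0] : List Int) ++ (List.range m).map
        (fun k => ((List.range (k+1)).map (fun j => pvInd p j + pvInd c j + pvInd n j)).sum)).getD k 0
      = pvP p k + pvP c k + pvP n k := by
  have hr : (([0] : List Int) ++ (List.range m).map
        (fun k => ((List.range (k+1)).map (fun j => pvInd p j + pvInd c j + pvInd n j)).sum)).getD k 0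
      = ((List.range k).map (fun j => pvInd p j + pvInd c j + pvInd n j)).sum := by
    cases k with
    | zero => simp
    | succ t =>
      have ht : t < m := by omega
      simp [List.getD, List.getElem?_map, List.getElem?_range ht]
  rw [hr]
  simp only [pvP_eq_range]
  rw [← List.sum_map_add, ← List.sum_map_add]

-- ===== VERDICT (by name: the statement is the Claim_ definition above) =====
theorem identify_rolls_spec : Claim_equal_identify_rolls := by
  intro p c n _
  show identify_rolls p c n = identify_rolls_alt p c n
  have hpm : p.length ≤ max (max p.length c.length) n.length := by omega
  have hcm : c.length ≤ max (max p.length c.length) n.length := by omega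
  have hnm : n.length ≤ max (max p.length c.length) n.length := by omega
  unfold identify_rolls identify_rolls_alt
  simp only [pvPreSpec]
  refine congrArg (fun r : Int × List String => (r.1, PySem.Str.join "" r.2))
    (PySem.List.foldl_congr_mem' _ _ _ _ ?_)
  intro x hx acc
  obtain ⟨k, hk, rfl⟩ := (PySem.List.mem_enumerate_iff _ _ _).1 hx
  dsimp only
  set M := max (max p.length c.length) n.length with hMdef
  have hpM : p.length ≤ M := by omega
  have hcM : c.length ≤ M := by omega
  have hnM : n.length ≤ M := by omega
  have hlo : (if (0:Int) + (k:Int) = 0 then (0:Nat) else ((0:Int) + (k:Int) - 1).toNat) = k - 1 := by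
    split_ifs <;> omega
  have hhi : min ((0:Int) + (k:Int) + 2).toNat M = min (k+2) M := by
    congr 1; omega
  have hs : ∀ row : List String,
      PySem.List.slice row (some (if (0:Int) + (k:Int) = 0 then 0 else (0:Int) + (k:Int) - 1)) (some ((0:Int) + (k:Int) + 2))
        = (row.drop (k-1)).take ((k+2)-(k-1)) := by
    intro row
    by_cases h0 : k = 0
    · subst h0
      simpa using PySem.List.slice_natCast row 0 2
    · have h1 : (if (0:Int) + (k:Int) = 0 then (0:Int) else (0:Int) + (k:Int) - 1) = ((k-1 : Nat) : Int) := by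
        split_ifs <;> omega
      have h2 : (0:Int) + (k:Int) + 2 = ((k+2 : Nat) : Int) := by omega
      rw [h1, h2, PySem.List.slice_natCast]
  have hcount : ∀ row : List String, row.length ≤ M →
      (((row.drop (k-1)).take ((k+2)-(k-1))).map (fun selection => if selection = "@" then (1:Int) else 0)).sum
        = pvP row (min (k+2) M) - pvP row (k-1) := by
    intro row hrow
    rw [pvSliceCount]
    have h3 : (k-1) + ((k+2)-(k-1)) = k+2 := by omega
    rw [h3]
    rcases Nat.le_total (k+2) M with h|h
    · rw [min_eq_left h]
    · rw [min_eq_right h]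
      have h4 := pvP_stable row (a := k+2) (b := M) (by omega) (by omega)
      omega
  simp only [hs, hlo, hhi, List.map_append, List.sum_append,
    hcount p hpM, hcount c hcM, hcount n hnM,
    pvPre_getD p c n M (min (k+2) M) (by omega),
    pvPre_getD p c n M (k-1) (by omega)]
  split_ifs <;> first | rfl | (exfalso; omega)
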